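-- pv_equiv track=rewrite | github.com/0x73746F66/trivialscan | src/trivialscan/evaluations/__init__.py | _parse_robots_path
-- ===== SOURCE A (Python) =====
-- def _parse_robots_path(contents: str, http_request_path: str) -> bool:
--     track = False
--     trail_slash = http_request_path[len(http_request_path) - 1 :] == "/"
--     for line in contents.splitlines():
--         trim_path = http_request_path[: len(http_request_path) - 1].strip()
--         if track:
--             if not line.startswith("Disallow:"):
--                 track = False
--             else:
--                 disallow = line.replace("Disallow:", "").strip()
--                 if (
--                     trail_slash and trim_path and disallow == trim_path
--                 ) or disallow == http_request_path:
--                     return True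
--         if line.startswith("User-agent:") and "trivialscan" in line:
--             track = True
--             continue
--         if line == "User-agent: *":
--             track = True
--             continue
--     return False
-- ===== SOURCE B (Python) =====
-- def _parse_robots_path(contents: str, http_request_path: str) -> bool:
--     # Pass 1: group each matching User-agent header with the run of
--     # immediately-following "Disallow:" lines.
--     records = []
--     cur = None
--     lines = []
--     for line in contents.splitlines():
--         if cur is not None and line.startswith("Disallow:"):
--             lines.append(line)
--             continue
--         if cur is not None:
--             records.append((cur, lines))
--         if (line.startswith("User-agent:") and "trivialscan" in line) or line == "User-agent: *":
--             cur, lines = line, []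
--         else:
--             cur, lines = None, []
--     if cur is not None:
--         records.append((cur, lines))
--     # Pass 2: test the collected Disallow lines.
--     trail_slash = http_request_path.endswith("/")
--     trim_path = http_request_path[:-1].strip()
--     return any(
--         d == http_request_path or (trail_slash and trim_path != "" and d == trim_path)
--         for _, ls in records
--         for d in (l.replace("Disallow:", "").strip() for l in ls)
--     )
-- ===== Notes on version B (the rewrite author's own statement) =====
-- stated objective: alternative
-- what changed: A's single stateful tracking loop with an early return is replaced by two passes: pass 1 groups each matching User-agent header with its run of immediately-following Disallow lines, pass 2 computes trail_slash/trim_path once and tests the collected Disallow lines with any().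
import Mathlib
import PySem

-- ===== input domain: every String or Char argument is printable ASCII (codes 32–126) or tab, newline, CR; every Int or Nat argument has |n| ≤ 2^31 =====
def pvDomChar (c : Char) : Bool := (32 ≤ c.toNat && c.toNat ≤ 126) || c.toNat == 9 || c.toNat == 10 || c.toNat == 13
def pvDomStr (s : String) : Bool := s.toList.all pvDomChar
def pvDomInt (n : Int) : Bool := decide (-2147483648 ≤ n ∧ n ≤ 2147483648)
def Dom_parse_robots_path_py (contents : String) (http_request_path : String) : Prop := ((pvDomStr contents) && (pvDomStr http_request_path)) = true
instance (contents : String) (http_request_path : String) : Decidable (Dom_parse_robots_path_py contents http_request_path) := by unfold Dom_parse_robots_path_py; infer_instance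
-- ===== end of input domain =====

-- B restructures A's single tracking loop into two passes (group Disallow runs under
-- matching User-agent headers, then test them); return values proved equal on all inputs.

-- ===== PORT A =====
-- the for-loop of A, state = track; returning true models Python's early `return True`
def pvALoop (hrp : String) (trail_slash : Bool) : List String → Bool → Bool
  | [], _ => false
  | line :: rest, track =>
    let trim_path := PySem.Str.strip (PySem.Str.slice hrp none (some ((PySem.Str.len hrp : Int) - 1)))
    -- the two `User-agent` checks at the bottom of the loop body (`continue` re-enters the loop)
    let tail : Bool → Bool := fun tr =>
      if PySem.Str.startswith line "User-agent:" && PySem.Str.isIn "trivialscan" line then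
        pvALoop hrp trail_slash rest true
      else if line == "User-agent: *" then
        pvALoop hrp trail_slash rest true
      else
        pvALoop hrp trail_slash rest tr
    if track then
      if ¬ (PySem.Str.startswith line "Disallow:" = true) then
        tail false
      else
        let disallow := PySem.Str.strip (PySem.Str.replace line "Disallow:" "")
        if (trail_slash && !(trim_path == "") && disallow == trim_path) || disallow == hrp then
          true
        else
          tail true
    else
      tail false

def parse_robots_path_py (contents : String) (http_request_path : String) : Bool :=
  let trail_slash := PySem.Str.slice http_request_path (some ((PySem.Str.len http_request_path : Int) - 1)) none == "/"
  pvALoop http_request_path trail_slash (PySem.Str.splitlines contents) false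

-- ===== PORT B =====
-- pass 1 of B: group each matching header with the run of Disallow lines following it
def pvBPass1 : List String → Option String → List String → List (String × List String) → List (String × List String)
  | [], cur, lines, acc =>
    (match cur with
     | some h => acc ++ [(h, lines)]
     | none => acc)
  | line :: rest, cur, lines, acc =>
    if cur.isSome && PySem.Str.startswith line "Disallow:" then
      pvBPass1 rest cur (lines ++ [line]) acc
    else
      let acc' := (match cur with
                   | some h => acc ++ [(h, lines)]
                   | none => acc)
      if (PySem.Str.startswith line "User-agent:" && PySem.Str.isIn "trivialscan" line) || line == "User-agent: *" then
        pvBPass1 rest (some line) [] acc'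
      else
        pvBPass1 rest none [] acc'

def parse_robots_path_py_alt (contents : String) (http_request_path : String) : Bool :=
  let records := pvBPass1 (PySem.Str.splitlines contents) none [] []
  let trail_slash := PySem.Str.endswith http_request_path "/"
  let trim_path := PySem.Str.strip (PySem.Str.slice http_request_path none (some (-1)))
  records.any (fun r => r.2.any (fun l =>
    let d := PySem.Str.strip (PySem.Str.replace l "Disallow:" "")
    d == http_request_path || (trail_slash && !(trim_path == "") && d == trim_path)))

-- ===== PRECONDITION & SPEC =====
def Spec_parse_robots_path_py (contents : String) (http_request_path : String) (out : Bool) : Prop := out = parse_robots_path_py_alt contents http_request_path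
instance (contents : String) (http_request_path : String) (out : Bool) : Decidable (Spec_parse_robots_path_py contents http_request_path out) := by unfold Spec_parse_robots_path_py; infer_instance

-- ===== CLAIM (what is proved, stated in full; the proofs are below) =====
def Claim_equal_parse_robots_path_py : Prop := ∀ (contents : String) (http_request_path : String), Dom_parse_robots_path_py contents http_request_path → Spec_parse_robots_path_py contents http_request_path (parse_robots_path_py contents http_request_path)

-- ===== LEMMAS AND PROOFS =====

-- B's per-line test, as a named function for the proofs
def pvTest (hrp : String) (ts : Bool) (tp : String) (l : String) : Bool :=
  PySem.Str.strip (PySem.Str.replace l "Disallow:" "") == hrp ||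
    (ts && !(tp == "") && PySem.Str.strip (PySem.Str.replace l "Disallow:" "") == tp)

def pvRTest (hrp : String) (ts : Bool) (tp : String) (r : String × List String) : Bool :=
  r.2.any (pvTest hrp ts tp)

-- A's trim_path (hrp[: len-1]) equals B's (hrp[:-1])
lemma pv_trim_eq (s : String) :
    PySem.Str.slice s none (some ((PySem.Str.len s : Int) - 1)) = PySem.Str.slice s none (some (-1)) := by
  apply String.toList_inj.mp
  rw [PySem.Str.toList_slice, PySem.Str.toList_slice, PySem.Chars.slice_eq_listSlice, PySem.Chars.slice_eq_listSlice]
  rw [PySem.Str.len_eq]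
  cases hl : s.toList with
  | nil => norm_num
  | cons c cs =>
    rw [PySem.List.slice_to_neg_one]
    have : ((c :: cs).length : Int) - 1 = ((cs.length : Nat) : Int) := by simp
    rw [this, PySem.List.slice_to_natCast]
    simp [List.dropLast_eq_take]

-- A's trail_slash (hrp[len-1:] == "/") equals B's endswith
lemma pv_trail_eq (s : String) :
    (PySem.Str.slice s (some ((PySem.Str.len s : Int) - 1)) none == "/") = PySem.Str.endswith s "/" := by
  rw [PySem.Str.endswith_eq]
  rw [Bool.eq_iff_iff, beq_iff_eq, PySem.Chars.endswith_iff, ← String.toList_inj,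
    PySem.Str.toList_slice, PySem.Chars.slice_eq_listSlice, PySem.Str.len_eq]
  cases hl : s.toList with
  | nil => simp [PySem.List.slice_some_none]
  | cons c cs =>
    have : ((c :: cs).length : Int) - 1 = ((cs.length : Nat) : Int) := by simp
    rw [this, PySem.List.slice_from_natCast]
    constructor
    · intro h
      rw [List.suffix_iff_eq_drop]
      simpa using h.symm
    · intro h
      rw [List.suffix_iff_eq_drop] at h
      simpa using h.symm

lemma pvBPass1_acc_mono (hrp : String) (ts : Bool) (tp : String) :
    ∀ (ls : List String) (cur : Option String) (lines : List String) (acc : List (String × List String)),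
      acc.any (pvRTest hrp ts tp) = true →
      (pvBPass1 ls cur lines acc).any (pvRTest hrp ts tp) = true := by
  intro ls
  induction ls with
  | nil =>
    intro cur lines acc hacc
    cases cur <;> simp [pvBPass1, List.any_append, hacc]
  | cons line rest ih =>
    intro cur lines acc hacc
    unfold pvBPass1
    split
    · exact ih cur (lines ++ [line]) acc hacc
    · cases cur <;> simp only [] <;> split <;>
        first
          | exact ih _ [] _ hacc
          | exact ih _ [] _ (by simp [List.any_append, hacc])

lemma pvBPass1_cur_mono (hrp : String) (ts : Bool) (tp : String) :
    ∀ (ls : List String) (h : String) (lines : List String) (acc : List (String × List String)),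
      lines.any (pvTest hrp ts tp) = true →
      (pvBPass1 ls (some h) lines acc).any (pvRTest hrp ts tp) = true := by
  intro ls
  induction ls with
  | nil =>
    intro h lines acc hl
    simp [pvBPass1, List.any_append, pvRTest, hl]
  | cons line rest ih =>
    intro h lines acc hl
    unfold pvBPass1
    split
    · exact ih h (lines ++ [line]) acc (by simp [List.any_append, hl])
    · have hacc : (acc ++ [(h, lines)]).any (pvRTest hrp ts tp) = true := by
        simp [List.any_append, pvRTest, hl]
      simp only []
      split
      · exact pvBPass1_acc_mono hrp ts tp rest (some line) [] _ hacc
      · exact pvBPass1_acc_mono hrp ts tp rest none [] _ hacc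

lemma pv_key (hrp : String) (ts : Bool) :
    ∀ (ls : List String) (cur : Option String) (lines : List String) (acc : List (String × List String)),
      lines.any (pvTest hrp ts (PySem.Str.strip (PySem.Str.slice hrp none (some (-1))))) = false →
      acc.any (pvRTest hrp ts (PySem.Str.strip (PySem.Str.slice hrp none (some (-1))))) = false →
      pvALoop hrp ts ls cur.isSome =
        (pvBPass1 ls cur lines acc).any (pvRTest hrp ts (PySem.Str.strip (PySem.Str.slice hrp none (some (-1))))) := by
  intro ls
  induction ls with
  | nil =>
    intro cur lines acc hl hacc
    cases cur <;> simp [pvALoop, pvBPass1, List.any_append, pvRTest, hl, hacc]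
  | cons line rest ih =>
    intro cur lines acc hl hacc
    unfold pvALoop pvBPass1
    cases cur with
    | none =>
      simp only [Option.isSome_none, Bool.false_and, Bool.false_eq_true, if_false]
      cases hc1 : (PySem.Str.startswith line "User-agent:" && PySem.Str.isIn "trivialscan" line) with
      | true =>
        simp only [Bool.true_or, reduceIte]
        simpa using ih (some line) [] acc rfl hacc
      | false =>
        cases hc2 : (line == "User-agent: *") with
        | true =>
          simp only [Bool.false_or, Bool.false_eq_true, reduceIte]
          simpa using ih (some line) [] acc rfl hacc
        | false =>
          simp only [Bool.false_or, Bool.false_eq_true, reduceIte]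
          simpa using ih none [] acc rfl hacc
    | some h =>
      simp only [Option.isSome_some, Bool.true_and, if_true]
      rw [pv_trim_eq hrp]
      cases hd : PySem.Str.startswith line "Disallow:" with
      | true =>
        simp only [not_true_eq_false, reduceIte]
        cases hc : ((ts && !(PySem.Str.strip (PySem.Str.slice hrp none (some (-1))) == "") &&
              (PySem.Str.strip (PySem.Str.replace line "Disallow:" "") ==
                PySem.Str.strip (PySem.Str.slice hrp none (some (-1))))) ||
              PySem.Str.strip (PySem.Str.replace line "Disallow:" "") == hrp) with
        | true =>
          have ht : pvTest hrp ts (PySem.Str.strip (PySem.Str.slice hrp none (some (-1)))) line = true := by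
            unfold pvTest; rw [Bool.or_comm]; exact hc
          simp only [reduceIte]
          exact (pvBPass1_cur_mono hrp ts _ rest h (lines ++ [line]) acc
            (by simp [List.any_append, ht])).symm
        | false =>
          have hf : pvTest hrp ts (PySem.Str.strip (PySem.Str.slice hrp none (some (-1)))) line = false := by
            unfold pvTest; rw [Bool.or_comm]; exact hc
          have hl' : (lines ++ [line]).any (pvTest hrp ts (PySem.Str.strip (PySem.Str.slice hrp none (some (-1))))) = false := by
            simp [List.any_append, hl, hf]
          simp only [Bool.false_eq_true, reduceIte, ite_self]
          simpa using ih (some h) (lines ++ [line]) acc hl' hacc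
      | false =>
        have hacc' : (acc ++ [(h, lines)]).any (pvRTest hrp ts (PySem.Str.strip (PySem.Str.slice hrp none (some (-1))))) = false := by
          simp [List.any_append, hacc, pvRTest, hl]
        simp only [Bool.false_eq_true, not_false_eq_true, reduceIte]
        cases hc1 : (PySem.Str.startswith line "User-agent:" && PySem.Str.isIn "trivialscan" line) with
        | true =>
          simp only [Bool.true_or, reduceIte]
          simpa using ih (some line) [] (acc ++ [(h, lines)]) rfl hacc'
        | false =>
          cases hc2 : (line == "User-agent: *") with
          | true =>
            simp only [Bool.false_or, Bool.false_eq_true, reduceIte]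
            simpa using ih (some line) [] (acc ++ [(h, lines)]) rfl hacc'
          | false =>
            simp only [Bool.false_or, Bool.false_eq_true, reduceIte]
            simpa using ih none [] (acc ++ [(h, lines)]) rfl hacc'

-- ===== VERDICT (by name: the statement is the Claim_ definition above) =====
theorem parse_robots_path_py_spec : Claim_equal_parse_robots_path_py := by
  intro contents hrp _
  unfold Spec_parse_robots_path_py parse_robots_path_py parse_robots_path_py_alt
  rw [pv_trail_eq]
  exact pv_key hrp (PySem.Str.endswith hrp "/") (PySem.Str.splitlines contents) none [] [] rfl rfl
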